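-- pv_equiv track=rewrite | github.com/simulatedScience/Twisty_Puzzle_Program | src/algorithm_generation/move_com_symmetry_detection.py | get_move_signatures
-- ===== SOURCE A (Python) =====
-- from collections import Counter
--
-- def get_move_signatures(moves: dict[str, list[list[int]]]) -> dict[str, tuple[tuple[int, int], ...]]:
--     """
--     For each move, calculate its move signature: a tuple ([(cycle_length_1, n_cycles_1), (cycle_length_2, n_cycles_2), ...]). For each different cycle length, this counts how many cycles of that length are in the move.
--
--     Args:
--         moves (dict[str, list[list[int]]]): dictionary with move names and cycle lists
--             every move is represented as a list of cycles
--                 describing the move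
--     """
--     move_signatures: dict[str, tuple[int, tuple[int, int]]] = dict()
--     for move_name, move_cycles in moves.items():
--         move_cycle_lengths: list[int] = [len(cycle) for cycle in move_cycles]
--         # count how often each cycle length appears
--         cycle_counts: Counter = Counter(move_cycle_lengths)
--         # create a tuple of cycle lengths and their counts
--         move_signature: tuple[tuple[int, int], ...] = tuple((length, count) for length, count in sorted(cycle_counts.items()))
--         move_signatures[move_name] = move_signature
--     return move_signatures
-- ===== SOURCE B (Python) =====
-- def get_move_signatures(moves: dict[str, list[list[int]]]) -> dict[str, tuple[tuple[int, int], ...]]: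
--     """Sort each move's cycle lengths, then run-length-encode the sorted list
--     with a two-pointer scan (no Counter dictionary is built)."""
--     move_signatures = {}
--     for move_name, move_cycles in moves.items():
--         lengths = sorted(len(cycle) for cycle in move_cycles)
--         signature = []
--         i, n = 0, len(lengths)
--         while i < n:
--             j = i
--             while j < n and lengths[j] == lengths[i]:
--                 j += 1
--             signature.append((lengths[i], j - i))
--             i = j
--         move_signatures[move_name] = tuple(signature)
--     return move_signatures
-- ===== Notes on version B (the rewrite author's own statement) =====
-- stated objective: alternative
-- what changed: Replaces Counter-then-sort-distinct-items with sort-the-lengths-then-run-length-encode via a two-pointer scan over consecutive equal runs; no count dictionary is maintained.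
import Mathlib
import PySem

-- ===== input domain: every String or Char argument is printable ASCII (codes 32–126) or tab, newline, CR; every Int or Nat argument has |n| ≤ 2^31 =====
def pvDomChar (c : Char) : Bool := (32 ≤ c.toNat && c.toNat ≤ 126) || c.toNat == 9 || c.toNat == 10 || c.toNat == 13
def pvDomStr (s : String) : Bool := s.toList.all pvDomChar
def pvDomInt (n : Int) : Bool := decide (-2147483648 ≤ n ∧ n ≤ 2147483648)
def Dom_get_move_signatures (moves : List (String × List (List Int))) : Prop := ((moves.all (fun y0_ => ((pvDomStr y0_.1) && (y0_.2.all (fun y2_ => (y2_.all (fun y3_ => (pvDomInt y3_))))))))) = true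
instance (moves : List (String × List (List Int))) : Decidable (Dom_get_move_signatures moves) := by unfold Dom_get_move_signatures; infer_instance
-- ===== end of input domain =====

-- B replaces A's Counter-then-sort-distinct-items with sort-the-cycle-lengths-then-
-- run-length-encode-consecutive-runs (objective: alternative algorithm, same result).
-- The dict argument is materialized with PySem.Dict.ofList (Python dict semantics).

-- ===== PORT A =====
-- signature = tuple((length, count) for length, count in sorted(Counter([len(c) for c in cycles]).items()))
-- (Python's default sort on the (int, int) item tuples is lexicographic → sorted2 fst snd)
def pySignatureA (move_cycles : List (List Int)) : List (Int × Int) :=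
  let move_cycle_lengths : List Int := move_cycles.map (fun cycle => (cycle.length : Int))
  let cycle_counts : PySem.Dict Int Int := PySem.Dict.counter move_cycle_lengths
  PySem.List.sorted2 cycle_counts.items Prod.fst Prod.snd

def get_move_signatures (moves : List (String × List (List Int))) : List (String × List (Int × Int)) :=
  (((PySem.Dict.ofList moves).items).foldl
    (fun move_signatures p => move_signatures.insert p.1 (pySignatureA p.2))
    (PySem.Dict.empty : PySem.Dict String (List (Int × Int)))).items

-- ===== PORT B =====
-- the two-pointer while loop of Source B: the inner 'while j < n and lengths[j] == lengths[i]'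
-- takes the maximal run of elements equal to the head (takeWhile), appends (value, run length),
-- and resumes the outer loop at j (dropWhile); exact transcription of the index scan.
def pyRuns (xs : List Int) : List (Int × Int) :=
  match xs with
  | [] => []
  | x :: t =>
      (x, 1 + ((t.takeWhile (fun y => y == x)).length : Int)) :: pyRuns (t.dropWhile (fun y => y == x))
termination_by xs.length
decreasing_by
  simpa using Nat.lt_succ_of_le (List.length_dropWhile_le (fun y => y == x) t)

def pySignatureB (move_cycles : List (List Int)) : List (Int × Int) :=
  let lengths : List Int := PySem.List.sorted (move_cycles.map (fun cycle => (cycle.length : Int))) (fun x => x)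
  pyRuns lengths

def get_move_signatures_alt (moves : List (String × List (List Int))) : List (String × List (Int × Int)) :=
  (((PySem.Dict.ofList moves).items).foldl
    (fun move_signatures p => move_signatures.insert p.1 (pySignatureB p.2))
    (PySem.Dict.empty : PySem.Dict String (List (Int × Int)))).items

-- ===== PRECONDITION & SPEC =====
def Spec_get_move_signatures (moves : List (String × List (List Int))) (out : List (String × List (Int × Int))) : Prop := out = get_move_signatures_alt moves
instance (moves : List (String × List (List Int))) (out : List (String × List (Int × Int))) : Decidable (Spec_get_move_signatures moves out) := by unfold Spec_get_move_signatures; infer_instance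

-- ===== CLAIM (what is proved, stated in full; the proofs are below) =====
def Claim_equal_get_move_signatures : Prop := ∀ (moves : List (String × List (List Int))), Dom_get_move_signatures moves → Spec_get_move_signatures moves (get_move_signatures moves)

-- ===== LEMMAS AND PROOFS =====

-- lexicographic ≤ on (Int × Int), the order Python's tuple sort realizes
def lexLe (a b : Int × Int) : Prop := a.1 < b.1 ∨ (a.1 = b.1 ∧ a.2 ≤ b.2)

theorem lexLe_antisymm (a b : Int × Int) (h1 : lexLe a b) (h2 : lexLe b a) : a = b := by
  unfold lexLe at h1 h2
  have : a.1 = b.1 ∧ a.2 = b.2 := by omega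
  exact Prod.ext this.1 this.2

theorem insertBy_lex_pairwise (x : Int × Int) (ys : List (Int × Int)) (h : ys.Pairwise lexLe) :
    (PySem.List.insertBy
      (fun a b => decide (a.1 < b.1) || (!decide (b.1 < a.1) && decide (a.2 < b.2))) x ys).Pairwise lexLe := by
  induction ys with
  | nil => simp [PySem.List.insertBy, lexLe]
  | cons y t ih =>
      rw [List.pairwise_cons] at h
      simp only [PySem.List.insertBy]
      split
      · rename_i hb
        simp only [Bool.or_eq_true, Bool.and_eq_true, decide_eq_true_eq, Bool.not_eq_eq_eq_not,
          Bool.not_true, decide_eq_false_iff_not] at hb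
        refine List.pairwise_cons.mpr ⟨?_, List.pairwise_cons.mpr h⟩
        intro z hz
        rcases List.mem_cons.mp hz with hz | hz
        · subst hz; unfold lexLe; omega
        · have hyz := h.1 z hz
          unfold lexLe at hyz ⊢; omega
      · rename_i hb
        simp only [Bool.or_eq_true, Bool.and_eq_true, decide_eq_true_eq, Bool.not_eq_eq_eq_not,
          Bool.not_true, decide_eq_false_iff_not, not_or, not_and, not_lt] at hb
        refine List.pairwise_cons.mpr ⟨?_, ih h.2⟩
        intro z hz
        rcases (PySem.List.insertBy_mem_iff _ _ _ _).mp hz with hz | hz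
        · subst hz; unfold lexLe; omega
        · exact h.1 z hz

theorem foldl_insertBy_lex_pairwise (xs acc : List (Int × Int)) (hacc : acc.Pairwise lexLe) :
    (xs.foldl (fun acc x =>
      PySem.List.insertBy
        (fun a b => decide (a.1 < b.1) || (!decide (b.1 < a.1) && decide (a.2 < b.2))) x acc) acc).Pairwise lexLe := by
  induction xs generalizing acc with
  | nil => simpa using hacc
  | cons x t ih => exact ih _ (insertBy_lex_pairwise x acc hacc)

theorem sorted2_fst_snd_pairwise (xs : List (Int × Int)) :
    (PySem.List.sorted2 xs Prod.fst Prod.snd).Pairwise lexLe := by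
  unfold PySem.List.sorted2
  simpa using foldl_insertBy_lex_pairwise xs [] (by simp)

-- naming lemma: any strictly fst-increasing rearrangement of xs IS sorted2 xs fst snd
theorem sorted2_eq_of_perm_of_pairwise_fst_lt (xs ys : List (Int × Int)) (hp : ys.Perm xs)
    (hys : ys.Pairwise (fun a b => a.1 < b.1)) :
    PySem.List.sorted2 xs Prod.fst Prod.snd = ys := by
  refine List.Perm.eq_of_pairwise (le := lexLe) (fun a b _ _ => lexLe_antisymm a b)
    (sorted2_fst_snd_pairwise xs) (hys.imp (fun h => Or.inl h))
    ((PySem.List.sorted2_perm xs Prod.fst Prod.snd false).trans hp.symm)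

-- the inner while loop on a sorted tail whose elements all dominate x
theorem runs_head (x : Int) (t : List Int) (hp : t.Pairwise (· ≤ ·)) (hmin : ∀ y ∈ t, x ≤ y) :
    (t.takeWhile (fun y => y == x)).length = t.count x ∧
      t.dropWhile (fun y => y == x) = t.filter (fun y => !(y == x)) := by
  induction t with
  | nil => simp
  | cons y s ih =>
      rw [List.pairwise_cons] at hp
      by_cases hxy : y = x
      · subst hxy
        have := ih hp.2 (fun z hz => hmin z (List.mem_cons_of_mem _ hz))
        simp [List.takeWhile, List.dropWhile, this.1, this.2]
      · have hlt : x < y := lt_of_le_of_ne (hmin y (List.mem_cons_self)) (Ne.symm hxy)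
        have hcount : s.count x = 0 := by
          rw [List.count_eq_zero]
          intro hx
          exact absurd (hp.1 x hx) (by omega)
        have hfilter : s.filter (fun y => !(y == x)) = s := by
          rw [List.filter_eq_self]
          intro z hz
          have := hp.1 z hz
          simp only [Bool.not_eq_eq_eq_not, Bool.not_true, beq_eq_false_iff_ne]
          omega
        have hbeq : (y == x) = false := by simp [hxy]
        constructor
        · simp [List.takeWhile, hbeq, hcount, hxy]
        · simp [List.dropWhile, hbeq, hfilter]

-- Set.add-fold facts, used to split dedup of a sorted list at its head
theorem foldl_add_skip (x : Int) (t s : List Int) (hx : x ∈ s) :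
    t.foldl PySem.Set.add s = (t.filter (fun y => !(y == x))).foldl PySem.Set.add s := by
  induction t generalizing s with
  | nil => simp
  | cons y ys ih =>
      by_cases hxy : y = x
      · subst hxy
        have hc : PySem.Set.add s y = s := by
          simp [PySem.Set.add, PySem.Set.contains, hx]
        have hf : (y :: ys).filter (fun z => !(z == y)) = ys.filter (fun z => !(z == y)) := by
          simp
        rw [hf, List.foldl_cons, hc]
        exact ih s hx
      · have hmem : x ∈ PySem.Set.add s y := by
          simp only [PySem.Set.add]; split
          · exact hx
          · exact List.mem_append_left _ hx
        have hf : (y :: ys).filter (fun z => !(z == x)) = y :: ys.filter (fun z => !(z == x)) := by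
          simp [hxy]
        rw [hf, List.foldl_cons, List.foldl_cons]
        exact ih _ hmem

theorem foldl_add_cons (t : List Int) (s : List Int) (x : Int) (h : ∀ y ∈ t, ¬(y = x)) :
    t.foldl PySem.Set.add (x :: s) = x :: t.foldl PySem.Set.add s := by
  induction t generalizing s with
  | nil => simp
  | cons y ys ih =>
      have hyx : ¬(y = x) := h y (List.mem_cons_self)
      have hrest : ∀ z ∈ ys, ¬(z = x) := fun z hz => h z (List.mem_cons_of_mem _ hz)
      have hadd : PySem.Set.add (x :: s) y = x :: PySem.Set.add s y := by
        have hcc : PySem.Set.contains (x :: s) y = PySem.Set.contains s y := by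
          simp [PySem.Set.contains, hyx]
        simp only [PySem.Set.add, hcc]
        split <;> simp
      simp only [List.foldl, hadd]
      exact ih _ hrest

theorem dedup_cons_filter (x : Int) (t : List Int) :
    PySem.List.dedup (x :: t) = x :: PySem.List.dedup (t.filter (fun y => !(y == x))) := by
  have h1 : PySem.List.dedup (x :: t) = t.foldl PySem.Set.add [x] := by
    simp only [PySem.List.dedup_eq_ofList, PySem.Set.ofList_eq_foldl, List.foldl]
    rfl
  have h2 : PySem.List.dedup (t.filter (fun y => !(y == x))) =
      (t.filter (fun y => !(y == x))).foldl PySem.Set.add [] := by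
    simp only [PySem.List.dedup_eq_ofList, PySem.Set.ofList_eq_foldl]
  rw [h1, h2, foldl_add_skip x t [x] (by simp)]
  exact foldl_add_cons _ [] x (by
    intro y hy
    have := List.of_mem_filter hy
    simpa using this)

theorem foldl_add_pairwise (t s : List Int) (ht : t.Pairwise (· ≤ ·)) (hs : s.Pairwise (· ≤ ·))
    (hcross : ∀ a ∈ s, ∀ b ∈ t, a ≤ b) : (t.foldl PySem.Set.add s).Pairwise (· ≤ ·) := by
  induction t generalizing s with
  | nil => simpa using hs
  | cons y ys ih =>
      rw [List.pairwise_cons] at ht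
      have hcross' : ∀ a ∈ PySem.Set.add s y, ∀ b ∈ ys, a ≤ b := by
        intro a ha b hb
        simp only [PySem.Set.add] at ha
        rcases (by split at ha <;> simp_all : a ∈ s ∨ a = y) with ha' | ha'
        · exact hcross a ha' b (List.mem_cons_of_mem _ hb)
        · subst ha'; exact ht.1 b hb
      have hadd : (PySem.Set.add s y).Pairwise (· ≤ ·) := by
        simp only [PySem.Set.add]; split
        · exact hs
        · refine List.pairwise_append.mpr ⟨hs, by simp, ?_⟩
          intro a ha b hb
          simp only [List.mem_singleton] at hb
          rw [hb]
          exact hcross a ha y List.mem_cons_self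
      exact ih _ ht.2 hadd hcross'

theorem dedup_pairwise_lt (s : List Int) (hs : s.Pairwise (· ≤ ·)) :
    (PySem.List.dedup s).Pairwise (· < ·) := by
  have hle : (PySem.List.dedup s).Pairwise (· ≤ ·) := by
    simp only [PySem.List.dedup_eq_ofList, PySem.Set.ofList_eq_foldl]
    exact foldl_add_pairwise s [] hs (by simp) (by simp)
  have hnd : (PySem.List.dedup s).Nodup := PySem.List.nodup_dedup s
  exact (hle.and hnd).imp (fun h => lt_of_le_of_ne h.1 h.2)

-- run-length encoding of a sorted list = (distinct values in order, multiplicity)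
theorem runs_sorted (s : List Int) (hs : s.Pairwise (· ≤ ·)) :
    pyRuns s = (PySem.List.dedup s).map (fun v => (v, (s.count v : Int))) := by
  induction hn : s.length using Nat.strong_induction_on generalizing s with
  | _ n ih =>
      match s, hs with
      | [], _ => simp [pyRuns]
      | x :: t, hs =>
        rw [List.pairwise_cons] at hs
        have hmin : ∀ y ∈ t, x ≤ y := hs.1
        obtain ⟨htake, hdrop⟩ := runs_head x t hs.2 hmin
        have hflen : (t.filter (fun y => !(y == x))).length < n := by
          subst hn
          exact Nat.lt_succ_of_le (List.length_filter_le _ _)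
        have hfpair : (t.filter (fun y => !(y == x))).Pairwise (· ≤ ·) := hs.2.filter _
        have hIH := ih _ hflen _ hfpair rfl
        rw [pyRuns, htake, hdrop, hIH, dedup_cons_filter]
        simp only [List.map_cons, List.count_cons_self]
        refine List.cons_eq_cons.mpr ⟨?_, ?_⟩
        · rw [Prod.mk.injEq]
          refine ⟨rfl, by push_cast; ring⟩
        · apply List.map_congr_left
          intro v hv
          have hvne : ¬(v = x) := by
            have := List.of_mem_filter ((PySem.List.mem_dedup _ _).mp hv)
            simpa using this
          have hc : (t.filter (fun y => !(y == x))).count v = t.count v :=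
            List.count_filter (by simp [hvne])
          simp [hc, Ne.symm hvne]

-- per-move core: Counter-then-sort equals sort-then-run-length-encode
theorem sig_core (move_cycles : List (List Int)) : pySignatureA move_cycles = pySignatureB move_cycles := by
  unfold pySignatureA pySignatureB
  set L : List Int := move_cycles.map (fun cycle => (cycle.length : Int)) with hL
  set s : List Int := PySem.List.sorted L (fun x => x) with hs
  have hsp : s.Pairwise (· ≤ ·) := PySem.List.sorted_pairwise L (fun x => x)
  have hperm : s.Perm L := PySem.List.sorted_perm L (fun x => x) false
  have hB : pyRuns s = (PySem.List.dedup s).map (fun v => (v, (L.count v : Int))) := by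
    rw [runs_sorted s hsp]
    apply List.map_congr_left
    intro v _
    simp [hperm.count_eq]
  rw [hB]
  apply sorted2_eq_of_perm_of_pairwise_fst_lt
  · rw [PySem.Dict.items_counter]
    exact List.Perm.map _ (by
      rw [List.perm_ext_iff_of_nodup (PySem.List.nodup_dedup s) (PySem.Set.nodup_ofList L)]
      intro a
      rw [PySem.List.mem_dedup, PySem.Set.mem_ofList, hperm.mem_iff])
  · rw [List.pairwise_map]
    exact dedup_pairwise_lt s hsp

theorem outer_items (f : List (List Int) → List (Int × Int))
    (l : List (String × List (List Int))) (hnd : (l.map Prod.fst).Nodup) :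
    (l.foldl (fun d p => d.insert p.1 (f p.2))
      (PySem.Dict.empty : PySem.Dict String (List (Int × Int)))).items =
      l.map (fun p => (p.1, f p.2)) := by
  have := PySem.Dict.items_foldl_insert_fresh l (fun p => p.1) (fun p => f p.2)
    (PySem.Dict.empty : PySem.Dict String (List (Int × Int)))
    (fun a _ => PySem.Dict.contains_empty _) (by simpa using hnd)
  simpa using this

-- ===== VERDICT (by name: the statement is the Claim_ definition above) =====
theorem get_move_signatures_spec : Claim_equal_get_move_signatures := by
  intro moves _
  unfold Spec_get_move_signatures get_move_signatures get_move_signatures_alt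
  have hnd : (((PySem.Dict.ofList moves).items).map Prod.fst).Nodup := by
    have := PySem.Dict.nodup_keys_ofList moves
    simpa [PySem.Dict.keys] using this
  rw [outer_items pySignatureA _ hnd, outer_items pySignatureB _ hnd]
  apply List.map_congr_left
  intro p _
  rw [sig_core]
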